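-- pv_equiv track=rewrite | github.com/lsi3131/coding_test | baekjoon/stack/test_goodword_3986.py | solution
-- ===== SOURCE A (Python) =====
-- def solution(s_list: list[str]):
--     cnt = 0
--     for s in s_list:
--         stack = []
--         for i in range(len(s)):
--             if stack:
--                 if s[i] == stack[-1]:
--                     stack.pop()
--                 else:
--                     stack.append(s[i])
--             else:
--                 stack.append(s[i])
--
--         if not stack:
--             cnt += 1
--     return cnt
-- ===== SOURCE B (Python) =====
-- def _reduce(s):
--     # repeatedly delete the first adjacent equal pair until none remains
--     chars = list(s)
--     while True:
--         for i in range(len(chars) - 1):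
--             if chars[i] == chars[i + 1]:
--                 del chars[i:i + 2]
--                 break
--         else:
--             return chars
--
-- def solution(s_list):
--     return sum(1 for s in s_list if not _reduce(s))
-- ===== Notes on version B (the rewrite author's own statement) =====
-- stated objective: alternative
-- what changed: Replaces the explicit stack scan by a fixpoint rewriting: repeatedly find and delete the first adjacent equal pair until none remains, then test emptiness; counting is a sum over a generator instead of a counter loop.
import Mathlib
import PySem

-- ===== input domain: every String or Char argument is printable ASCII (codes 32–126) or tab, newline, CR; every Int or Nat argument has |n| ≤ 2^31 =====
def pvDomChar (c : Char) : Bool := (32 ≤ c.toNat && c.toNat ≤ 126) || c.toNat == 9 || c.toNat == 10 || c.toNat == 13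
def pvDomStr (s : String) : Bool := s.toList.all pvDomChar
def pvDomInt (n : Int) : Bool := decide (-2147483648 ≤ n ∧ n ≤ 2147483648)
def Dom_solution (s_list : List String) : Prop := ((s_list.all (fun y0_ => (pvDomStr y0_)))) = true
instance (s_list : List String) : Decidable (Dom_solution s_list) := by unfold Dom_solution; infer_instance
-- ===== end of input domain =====

-- B replaces A's stack scan by fixpoint deletion of adjacent equal pairs (alternative decomposition, same result).


-- ===== PORT A =====
-- Python stack with append/pop at the end is ported with the list HEAD as the stack top.
def solutionStep (stack : List Char) (c : Char) : List Char :=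
  match stack with
  | t :: ts => if c = t then ts else c :: t :: ts
  | [] => [c]

def solution (s_list : List String) : Int :=
  s_list.foldl (fun cnt s =>
    let stack := s.toList.foldl solutionStep []
    if stack.isEmpty then cnt + 1 else cnt) 0

-- ===== PORT B =====
-- delete the FIRST adjacent equal pair (none = no such pair); the for/else scan in Source B
def delFirst : List Char → Option (List Char)
  | a :: b :: r => if a = b then some r else (delFirst (b :: r)).map (a :: ·)
  | _ => none

theorem delFirst_length : ∀ {xs ys : List Char}, delFirst xs = some ys → ys.length + 2 = xs.length := by
  intro xs
  induction xs with
  | nil => intro ys h; simp [delFirst] at h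
  | cons a t ih =>
    intro ys h
    match t with
    | [] => simp [delFirst] at h
    | b :: r =>
      by_cases hab : a = b
      · simp [delFirst, hab] at h; subst h; simp
      · simp [delFirst, hab] at h
        obtain ⟨zs, hz, rfl⟩ := h
        have := ih hz
        simp at this ⊢
        omega

-- the while-True fixpoint loop of Source B
def reduceFix (xs : List Char) : List Char :=
  match hdel : delFirst xs with
  | some ys => reduceFix ys
  | none => xs
termination_by xs.length
decreasing_by have := delFirst_length hdel; omega

def solution_alt (s_list : List String) : Int :=
  ((s_list.countP (fun s => (reduceFix s.toList).isEmpty)) : Int)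

-- ===== PRECONDITION & SPEC =====
def Spec_solution (s_list : List String) (out : Int) : Prop := out = solution_alt s_list
instance (s_list : List String) (out : Int) : Decidable (Spec_solution s_list out) := by unfold Spec_solution; infer_instance

-- ===== CLAIM (what is proved, stated in full; the proofs are below) =====
def Claim_equal_solution : Prop := ∀ (s_list : List String), Dom_solution s_list → Spec_solution s_list (solution s_list)

-- ===== LEMMAS AND PROOFS =====

-- A's stack never holds two equal adjacent elements
theorem step_irred {st : List Char} {c : Char}
    (h : st.IsChain (· ≠ ·)) : (solutionStep st c).IsChain (· ≠ ·) := by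
  match st with
  | [] => simp [solutionStep]
  | t :: ts =>
    by_cases hc : c = t
    · simp only [solutionStep, hc]
      exact h.of_cons
    · simp only [solutionStep, if_neg hc]
      exact List.isChain_cons_cons.mpr ⟨hc, h⟩

-- pushing then reading the same char is the identity on an irreducible stack
theorem step_step {st : List Char} {c : Char}
    (h : st.IsChain (· ≠ ·)) : solutionStep (solutionStep st c) c = st := by
  match st with
  | [] => simp [solutionStep]
  | t :: ts =>
    by_cases hc : c = t
    · subst hc
      match ts with
      | [] => simp [solutionStep]
      | u :: us =>
        have hcu : c ≠ u := h.rel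
        simp [solutionStep, hcu]
    · simp [solutionStep, hc]

-- deleting an adjacent equal pair does not change A's stack
theorem foldl_delFirst : ∀ {xs ys st : List Char}, st.IsChain (· ≠ ·) →
    delFirst xs = some ys → xs.foldl solutionStep st = ys.foldl solutionStep st := by
  intro xs
  induction xs with
  | nil => intro ys st _ h; simp [delFirst] at h
  | cons a t ih =>
    intro ys st hst h
    match t with
    | [] => simp [delFirst] at h
    | b :: r =>
      by_cases hab : a = b
      · simp [delFirst, hab] at h
        subst h hab
        simp [List.foldl_cons, step_step hst]
      · simp [delFirst, hab] at h
        obtain ⟨zs, hz, rfl⟩ := h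
        simp only [List.foldl_cons]
        exact ih (step_irred hst) hz

theorem delFirst_none_irred : ∀ {xs : List Char}, delFirst xs = none → xs.IsChain (· ≠ ·) := by
  intro xs
  induction xs with
  | nil => intro; simp
  | cons a t ih =>
    intro h
    match t with
    | [] => simp
    | b :: r =>
      by_cases hab : a = b
      · simp [delFirst, hab] at h
      · simp [delFirst, hab] at h
        exact List.isChain_cons_cons.mpr ⟨hab, ih h⟩

-- on an irreducible word the stack just reverses it
theorem foldl_irred_self : ∀ {xs st : List Char}, xs.IsChain (· ≠ ·) → st.IsChain (· ≠ ·) →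
    (∀ c, xs.head? = some c → st.head? ≠ some c) →
    xs.foldl solutionStep st = xs.reverse ++ st := by
  intro xs
  induction xs with
  | nil => intro st _ _ _; simp
  | cons a t ih =>
    intro st hx hst hhd
    have hstep : solutionStep st a = a :: st := by
      match st with
      | [] => simp [solutionStep]
      | u :: us =>
        have : a ≠ u := fun e => hhd a rfl (by simp [e])
        simp [solutionStep, this]
    have hchain : (a :: st).IsChain (· ≠ ·) := by
      match st with
      | [] => simp
      | u :: us =>
        exact List.isChain_cons_cons.mpr ⟨fun e => hhd a rfl (by simp [e]), hst⟩
    have hhd' : ∀ c, t.head? = some c → (a :: st).head? ≠ some c := by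
      intro c hc
      match t with
      | [] => simp at hc
      | d :: ds =>
        simp at hc
        have had : a ≠ d := hx.rel
        intro e
        simp at e
        exact had (by rw [e, ← hc])
    rw [List.foldl_cons, hstep, ih hx.of_cons hchain hhd']
    simp

theorem reduceFix_some {xs ys : List Char} (h : delFirst xs = some ys) :
    reduceFix xs = reduceFix ys := by
  rw [reduceFix.eq_def]
  split
  · rename_i zs hz; rw [hz] at h; cases h; rfl
  · rename_i hn; rw [hn] at h; cases h

theorem reduceFix_none {xs : List Char} (h : delFirst xs = none) :
    reduceFix xs = xs := by
  rw [reduceFix.eq_def]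
  split
  · rename_i zs hz; rw [hz] at h; cases h
  · rfl

theorem stack_eq_reduceFix : ∀ xs : List Char,
    xs.foldl solutionStep [] = (reduceFix xs).reverse := by
  intro xs
  induction xs using reduceFix.induct with
  | case1 xs ys h ih =>
    rw [foldl_delFirst (by simp) h, ih, reduceFix_some h]
  | case2 xs h =>
    rw [reduceFix_none h]
    simpa using foldl_irred_self (st := []) (delFirst_none_irred h) (by simp) (by simp)

theorem count_foldl (p : String → Bool) : ∀ (l : List String) (cnt : Int),
    l.foldl (fun cnt s => if p s then cnt + 1 else cnt) cnt = cnt + (l.countP p : Int) := by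
  intro l
  induction l with
  | nil => simp
  | cons a t ih =>
    intro cnt
    by_cases hp : p a = true
    · simp [List.foldl_cons, hp, ih]
      ring
    · simp [List.foldl_cons, hp, ih]

-- ===== VERDICT (by name: the statement is the Claim_ definition above) =====
theorem solution_spec : Claim_equal_solution := by
  intro s_list _
  unfold Spec_solution solution solution_alt
  calc s_list.foldl (fun cnt s =>
          let stack := s.toList.foldl solutionStep []
          if stack.isEmpty then cnt + 1 else cnt) 0
      = s_list.foldl (fun cnt s =>
          if (s.toList.foldl solutionStep []).isEmpty then cnt + 1 else cnt) 0 := rfl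
    _ = (s_list.countP (fun s => (s.toList.foldl solutionStep []).isEmpty) : Int) := by
        simpa using count_foldl (fun s => (s.toList.foldl solutionStep []).isEmpty) s_list 0
    _ = (s_list.countP (fun s => (reduceFix s.toList).isEmpty) : Int) := by
        congr 1
        exact List.countP_congr (fun s _ => by simp [stack_eq_reduceFix s.toList])
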